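-- pv_equiv track=rewrite | github.com/finsberg/advent-of-code-2023 | day2/python/day2.py | min_power
-- ===== SOURCE A (Python) =====
-- from typing import Sequence, NamedTuple
-- from functools import reduce
--
-- class Set(NamedTuple):
--     red: int
--     blue: int
--     green: int
--
--     def power(self):
--         return self.red * self.blue * self.green
--
-- def set2cubes(item: str) -> Set:
--     items = [i.strip() for i in item.split(",")]
--     values = {"blue": 0, "red": 0, "green": 0}
--
--     for item in items:
--         for color in values:
--             if color in item:
--                 values[color] = int(item.strip(color).strip())
--     return Set(**values)
--
-- def min_power(text: str) -> int:
--     game, sets = text.split(":")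
--     sets_list = sets.split(";")
--
--     def func(xi: Set, x: Set) -> Set:
--         return Set(
--             red=max(x.red, xi.red),
--             blue=max(x.blue, xi.blue),
--             green=max(x.green, xi.green),
--         )
--
--     max_set = reduce(func, (set2cubes(item) for item in sets_list))
--     return max_set.power()
-- ===== SOURCE B (Python) =====
-- def _cube_count(items, color):
--     val = 0
--     for it in items:
--         if color in it:
--             val = int(it.strip(color).strip())
--     return val
--
--
-- def min_power(text: str) -> int:
--     game, sets = text.split(":")
--     parts = [[i.strip() for i in p.split(",")] for p in sets.split(";")]
--     return (
--         max(_cube_count(items, "red") for items in parts)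
--         * max(_cube_count(items, "blue") for items in parts)
--         * max(_cube_count(items, "green") for items in parts)
--     )
-- ===== Notes on version B (the rewrite author's own statement) =====
-- stated objective: simpler
-- what changed: Replaces the reduce of elementwise-max Set tuples built by set2cubes's dict-update loop with a per-colour last-match scan (_cube_count) and three independent max passes over the sets, multiplying the three maxima directly.
import Mathlib
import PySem

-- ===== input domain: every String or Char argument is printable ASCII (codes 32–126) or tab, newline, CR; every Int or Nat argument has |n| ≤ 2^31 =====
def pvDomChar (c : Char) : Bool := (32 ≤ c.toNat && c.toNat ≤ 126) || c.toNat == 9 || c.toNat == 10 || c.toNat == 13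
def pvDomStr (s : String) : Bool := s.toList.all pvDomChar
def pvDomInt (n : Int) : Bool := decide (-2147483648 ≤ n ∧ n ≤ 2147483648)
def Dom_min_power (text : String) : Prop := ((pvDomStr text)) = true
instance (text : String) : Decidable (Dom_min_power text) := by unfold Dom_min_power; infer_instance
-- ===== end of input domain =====

-- B replaces the reduce-of-elementwise-max over Set tuples (built by set2cubes's dict loop) with
-- a per-colour last-match scan and three independent max passes multiplied together (objective: simpler).

-- shared helpers of both ports and Pre_ (not themselves ports):
-- s.split(sep) for a non-empty literal sep (split? is some there, so the getD [] never fires)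
def pvSplit (s sep : String) : List String := (PySem.Str.split? s sep).getD []
-- int(it.strip(color).strip()) — the identical expression occurs in Source A and Source B
def pvParse (it color : String) : Option Int :=
  PySem.Int.ofStr? (PySem.Str.strip (PySem.Str.stripChars it color))

-- ===== PORT A =====
def set2cubes (item : String) : Int × Int × Int :=
  let items := (pvSplit item ",").map PySem.Str.strip
  let values : PySem.Dict String Int := PySem.Dict.ofList [("blue", 0), ("red", 0), ("green", 0)]
  let values := items.foldl (fun vs it =>
    (PySem.Dict.keys vs).foldl (fun vs2 color =>
      if PySem.Str.isIn color it then vs2.insert color ((pvParse it color).getD 0) else vs2) vs) values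
  (values.getD "red" 0, values.getD "blue" 0, values.getD "green" 0)

def min_power (text : String) : Int :=
  match pvSplit text ":" with
  | [_game, sets] =>
    let sets_list := pvSplit sets ";"
    match sets_list.map set2cubes with
    | [] => 0  -- unreachable: str.split never returns an empty list
    | h :: t =>
      let max_set := t.foldl (fun xi x => (max x.1 xi.1, max x.2.1 xi.2.1, max x.2.2 xi.2.2)) h
      max_set.1 * max_set.2.1 * max_set.2.2
  | _ => 0  -- Python raises (unpacking ValueError) unless the split on ":" has exactly 2 parts; excluded by Pre_

-- ===== PORT B =====
def pvCubeCount (items : List String) (color : String) : Int :=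
  items.foldl (fun val it => if PySem.Str.isIn color it then (pvParse it color).getD 0 else val) 0

def min_power_alt (text : String) : Int :=
  let split := pvSplit text ":"
  if split.length ≠ 2 then 0  -- same unpacking ValueError as A; excluded by Pre_
  else
    let sets := split.getD 1 ""
    let parts := (pvSplit sets ";").map (fun p => (pvSplit p ",").map PySem.Str.strip)
    ((PySem.List.max? (parts.map (fun items => pvCubeCount items "red")) (fun y => y)).getD 0)
      * ((PySem.List.max? (parts.map (fun items => pvCubeCount items "blue")) (fun y => y)).getD 0)
      * ((PySem.List.max? (parts.map (fun items => pvCubeCount items "green")) (fun y => y)).getD 0)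

-- ===== PRECONDITION & SPEC =====
-- Pre_ excludes exactly the inputs on which the Python A raises a ValueError: a text whose split on
-- ":" does not have exactly 2 parts (unpacking), or a comma item that mentions a colour but whose
-- colour-stripped remainder is not an int literal (int()).
def Pre_min_power (text : String) : Prop :=
  (pvSplit text ":").length = 2 ∧
  ∀ p ∈ pvSplit ((pvSplit text ":").getD 1 "") ";",
    ∀ it ∈ (pvSplit p ",").map PySem.Str.strip,
      ∀ color ∈ (["blue", "red", "green"] : List String),
        PySem.Str.isIn color it = true → (pvParse it color).isSome

instance (text : String) : Decidable (Pre_min_power text) := by unfold Pre_min_power; infer_instance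

def pvWitness_min_power : String := "Game 1: 3 blue, 4 red; 1 red, 2 green"

def Spec_min_power (text : String) (out : Int) : Prop := out = min_power_alt text
instance (text : String) (out : Int) : Decidable (Spec_min_power text out) := by unfold Spec_min_power; infer_instance

-- ===== CLAIM (what is proved, stated in full; the proofs are below) =====
def Claim_equal_min_power : Prop := ∀ (text : String), Dom_min_power text → Pre_min_power text → Spec_min_power text (min_power text)

-- ===== LEMMAS AND PROOFS =====

-- one per-colour update step of A's inner loop / B's scan
def pvG (color it : String) (v : Int) : Int :=
  if PySem.Str.isIn color it then (pvParse it color).getD 0 else v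

theorem pvCubeCount_eq_foldl (items : List String) (color : String) :
    pvCubeCount items color = items.foldl (fun v it => pvG color it v) 0 := rfl

theorem pvStep_eq (it : String) (b r g : Int) :
    ((PySem.Dict.keys (PySem.Dict.mk [("blue", b), ("red", r), ("green", g)])).foldl
      (fun vs2 color => if PySem.Str.isIn color it then vs2.insert color ((pvParse it color).getD 0) else vs2)
      (PySem.Dict.mk [("blue", b), ("red", r), ("green", g)]))
    = PySem.Dict.mk [("blue", pvG "blue" it b), ("red", pvG "red" it r), ("green", pvG "green" it g)] := by
  simp only [PySem.Dict.keys, List.map, List.foldl, pvG]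
  by_cases h1 : PySem.Str.isIn "blue" it <;>
    by_cases h2 : PySem.Str.isIn "red" it <;>
      by_cases h3 : PySem.Str.isIn "green" it <;>
        simp only [h1, h2, h3, if_true, if_false, Bool.false_eq_true] <;>
        simp [PySem.Dict.insert]

theorem pvFold_eq (items : List String) (b r g : Int) :
    (items.foldl (fun vs it =>
      (PySem.Dict.keys vs).foldl
        (fun vs2 color => if PySem.Str.isIn color it then vs2.insert color ((pvParse it color).getD 0) else vs2) vs)
      (PySem.Dict.mk [("blue", b), ("red", r), ("green", g)]))
    = PySem.Dict.mk [("blue", items.foldl (fun v it => pvG "blue" it v) b),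
                     ("red", items.foldl (fun v it => pvG "red" it v) r),
                     ("green", items.foldl (fun v it => pvG "green" it v) g)] := by
  induction items generalizing b r g with
  | nil => rfl
  | cons it rest ih => simp only [List.foldl, pvStep_eq, ih]

theorem set2cubes_eq (s : String) :
    set2cubes s = (pvCubeCount ((pvSplit s ",").map PySem.Str.strip) "red",
                   pvCubeCount ((pvSplit s ",").map PySem.Str.strip) "blue",
                   pvCubeCount ((pvSplit s ",").map PySem.Str.strip) "green") := by
  unfold set2cubes
  simp only [show (PySem.Dict.ofList [("blue", (0:Int)), ("red", 0), ("green", 0)])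
        = PySem.Dict.mk [("blue", 0), ("red", 0), ("green", 0)] from rfl, pvFold_eq]
  simp [pvCubeCount_eq_foldl, PySem.Dict.getD_eq_get?_getD, PySem.Dict.get?_mk_cons]

-- A's reduce of elementwise maxima, componentwise
theorem pvFoldTriple (t : List (Int × Int × Int)) (h : Int × Int × Int) :
    t.foldl (fun xi x => (max x.1 xi.1, max x.2.1 xi.2.1, max x.2.2 xi.2.2)) h
    = ((t.map (·.1)).foldl max h.1, (t.map (·.2.1)).foldl max h.2.1, (t.map (·.2.2)).foldl max h.2.2) := by
  induction t generalizing h with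
  | nil => rfl
  | cons x rest ih => rw [List.foldl_cons, ih]; simp [max_comm]

-- ===== VERDICT (by name: the statement is the Claim_ definition above) =====
theorem min_power_spec : Claim_equal_min_power := by
  intro text _hdom hpre
  unfold Spec_min_power min_power min_power_alt
  obtain ⟨hlen, -⟩ := hpre
  match hsplit : pvSplit text ":" with
  | [] => simp [hsplit] at hlen
  | [_] => simp [hsplit] at hlen
  | _ :: _ :: _ :: _ => simp [hsplit] at hlen
  | [game, sets] =>
    simp only
    match pvSplit sets ";" with
    | [] => simp [PySem.List.max?]
    | h :: t =>
      simp [set2cubes_eq, pvFoldTriple, PySem.List.max?_id_cons, Function.comp_def]
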